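-- pv_equiv track=rewrite | github.com/Quaid-Labs/agentlife | eval/tier_scores.py | classify_tier
-- ===== SOURCE A (Python) =====
-- TIER3_PREFIXES = ["non_question"]
--
-- TIER4_PREFIXES = ["arch_comprehension", "arch_planning"]
--
-- def classify_tier(query_type: str) -> str:
--     """Classify a query into Tier 3, Tier 4, or Tier 1+2."""
--     for prefix in TIER3_PREFIXES:
--         if query_type == prefix or query_type.startswith(prefix + " "):
--             return "tier3"
--     for prefix in TIER4_PREFIXES:
--         if query_type == prefix or query_type.startswith(prefix + " "):
--             return "tier4"
--     return "tier12"
-- ===== SOURCE B (Python) =====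
-- _TIER_BY_TOKEN = {
--     "non_question": "tier3",
--     "arch_comprehension": "tier4",
--     "arch_planning": "tier4",
-- }
--
-- def classify_tier(query_type: str) -> str:
--     """Classify a query into Tier 3, Tier 4, or Tier 1+2."""
--     return _TIER_BY_TOKEN.get(query_type.split(" ", 1)[0], "tier12")
-- ===== Notes on version B (the rewrite author's own statement) =====
-- stated objective: simpler
-- what changed: Replaces the two sequential prefix-scan loops (equality-or-startswith test per prefix) by extracting the first space-delimited token once with a single-split and looking it up in a precomputed token-to-tier dict.
import Mathlib
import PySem

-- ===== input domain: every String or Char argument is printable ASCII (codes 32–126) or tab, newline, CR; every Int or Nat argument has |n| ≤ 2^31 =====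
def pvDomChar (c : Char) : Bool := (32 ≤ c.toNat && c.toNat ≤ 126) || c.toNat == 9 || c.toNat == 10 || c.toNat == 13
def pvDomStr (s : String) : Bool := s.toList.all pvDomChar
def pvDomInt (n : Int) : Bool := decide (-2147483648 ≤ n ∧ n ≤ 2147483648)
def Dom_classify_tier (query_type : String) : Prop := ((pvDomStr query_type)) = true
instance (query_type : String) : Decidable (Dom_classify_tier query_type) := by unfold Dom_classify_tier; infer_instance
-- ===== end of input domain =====

-- B replaces A's two prefix-scan loops by one first-token extraction (split(" ", 1)[0]) plus a dict lookup; objective: simpler.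


-- ===== PORT A =====
def TIER3_PREFIXES : List String := ["non_question"]
def TIER4_PREFIXES : List String := ["arch_comprehension", "arch_planning"]

-- Python's `query_type == prefix or query_type.startswith(prefix + " ")`;
-- `prefix + " "` is ported as the exact char-list append (Lean's own String.append is kernel-opaque).
def pvPrefixHit (query_type : String) (p : String) : Bool :=
  query_type == p || PySem.Chars.startswith query_type.toList (p.toList ++ [' '])

-- the two for-loops with early return, in order
def classify_tier (query_type : String) : String :=
  if TIER3_PREFIXES.any (fun p => pvPrefixHit query_type p) then "tier3"
  else if TIER4_PREFIXES.any (fun p => pvPrefixHit query_type p) then "tier4"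
  else "tier12"

-- ===== PORT B =====
def TIER_BY_TOKEN : PySem.Dict String String :=
  ⟨[("non_question", "tier3"), ("arch_comprehension", "tier4"), ("arch_planning", "tier4")]⟩

def classify_tier_alt (query_type : String) : String :=
  match PySem.Str.splitMax? query_type " " 1 with
  | some parts => PySem.Dict.getD TIER_BY_TOKEN (parts.headD "") "tier12"
  | none => "tier12"   -- unreachable totality guard: the separator " " is nonempty

-- ===== PRECONDITION & SPEC =====
def Spec_classify_tier (query_type : String) (out : String) : Prop := out = classify_tier_alt query_type
instance (query_type : String) (out : String) : Decidable (Spec_classify_tier query_type out) := by unfold Spec_classify_tier; infer_instance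

-- ===== CLAIM (what is proved, stated in full; the proofs are below) =====
def Claim_equal_classify_tier : Prop := ∀ (query_type : String), Dom_classify_tier query_type → Spec_classify_tier query_type (classify_tier query_type)

-- ===== LEMMAS AND PROOFS =====

-- shape of split(" ", 1)'s fuelled worker: one cut at the first space (if any)
lemma go_spec (l : List Char) : ∀ (fuel : Nat), l.length < fuel → ∀ (cur : List Char) (acc : List (List Char)),
  PySem.Chars.splitOnMax.go [' '] fuel 1 l cur acc =
    acc.reverse ++ (if l.any (· == ' ')
      then [cur.reverse ++ l.takeWhile (· ≠ ' '), (l.dropWhile (· ≠ ' ')).drop 1]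
      else [cur.reverse ++ l]) := by
  induction l with
  | nil =>
    intro fuel hf cur acc
    match fuel, hf with
    | fuel+1, _ => simp [PySem.Chars.splitOnMax.go]
  | cons c rest ih =>
    intro fuel hf cur acc
    match fuel, hf with
    | fuel+1, hf =>
      by_cases hc : c = ' '
      · subst hc
        simp only [PySem.Chars.splitOnMax.go]
        have h1 : [' '].isPrefixOf (' ' :: rest) = true := by simp [List.isPrefixOf]
        rw [if_neg (by omega : ¬ (1:Nat) = 0), if_pos h1]
        match fuel, rest with
        | 0, rest => simp [PySem.Chars.splitOnMax.go, List.takeWhile, List.dropWhile]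
        | fuel+1, [] => simp [PySem.Chars.splitOnMax.go, List.takeWhile, List.dropWhile]
        | fuel+1, r :: rs => simp [PySem.Chars.splitOnMax.go, List.takeWhile, List.dropWhile]
      · have h1 : [' '].isPrefixOf (c :: rest) = false := by
          simp only [List.isPrefixOf, Bool.and_eq_false_iff, beq_eq_false_iff_ne]
          exact Or.inl fun h => hc h.symm
        simp only [PySem.Chars.splitOnMax.go]
        rw [if_neg (by omega : ¬ (1:Nat) = 0), if_neg (by simp [h1])]
        rw [ih fuel (by simpa using Nat.lt_of_succ_lt_succ hf) (c :: cur) acc]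
        simp [List.takeWhile, List.dropWhile, hc]

lemma splitOnMax_space (l : List Char) :
    PySem.Chars.splitOnMax l [' '] 1 =
      if l.any (· == ' ') then [l.takeWhile (· ≠ ' '), (l.dropWhile (· ≠ ' ')).drop 1]
      else [l] := by
  unfold PySem.Chars.splitOnMax
  rw [if_neg (by norm_num)]
  simpa using go_spec l (l.length + 1) (by omega) [] []

lemma dropWhile_head_false {p : Char → Bool} {l ds : List Char} {d : Char}
    (hd : l.dropWhile p = d :: ds) : p d = false := by
  induction l with
  | nil => simp at hd
  | cons x xs ih =>
    by_cases hx : p x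
    · rw [List.dropWhile_cons_of_pos hx] at hd; exact ih hd
    · rw [List.dropWhile_cons_of_neg hx] at hd
      cases hd; simpa using hx

-- A's per-prefix test (equality or startswith(prefix + " ")) holds iff the first
-- space-delimited token of l is exactly p (for a space-free p)
lemma hit_iff (l p : List Char) (hp : (' ' : Char) ∉ p) :
    (l = p ∨ (p ++ [' ']) <+: l) ↔ l.takeWhile (· ≠ ' ') = p := by
  constructor
  · rintro (rfl | ⟨t, ht⟩)
    · exact List.takeWhile_eq_self_iff.mpr (by intro a ha; simp; exact fun h => hp (h ▸ ha))
    · subst ht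
      induction p with
      | nil => simp
      | cons x xs ih =>
        have hx : x ≠ ' ' := fun h => hp (by simp [h])
        simp only [List.cons_append, List.takeWhile_cons, decide_eq_true_eq]
        rw [if_pos hx]
        simpa using ih (fun h => hp (List.mem_cons_of_mem _ h))
  · intro ht
    have hsplit : l.takeWhile (· ≠ ' ') ++ l.dropWhile (· ≠ ' ') = l := List.takeWhile_append_dropWhile
    rcases hd : l.dropWhile (· ≠ ' ') with _ | ⟨d, ds⟩
    · left; rw [← hsplit, hd, ht]; simp
    · right
      have hd' : d = ' ' := by simpa using dropWhile_head_false hd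
      exact ⟨ds, by rw [← hsplit, hd, ht, hd']; simp⟩

lemma hit_eq (q p : String) (hp : (' ' : Char) ∉ p.toList) :
    pvPrefixHit q p = true ↔ q.toList.takeWhile (· ≠ ' ') = p.toList := by
  unfold pvPrefixHit
  rw [Bool.or_eq_true, beq_iff_eq, PySem.Chars.startswith_iff, String.ext_iff]
  exact hit_iff q.toList p.toList hp

-- ===== VERDICT (by name: the statement is the Claim_ definition above) =====
theorem classify_tier_spec : Claim_equal_classify_tier := by
  intro q _
  unfold Spec_classify_tier
  -- B computes the dict lookup of the first token
  have hB : classify_tier_alt q =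
      PySem.Dict.getD TIER_BY_TOKEN (String.ofList (q.toList.takeWhile (· ≠ ' '))) "tier12" := by
    unfold classify_tier_alt
    have hsep : (" " : String).toList = [' '] := rfl
    simp only [PySem.Str.splitMax?, PySem.Chars.splitMax?, hsep]
    rw [if_neg (by simp)]
    rw [splitOnMax_space]
    by_cases hany : q.toList.any (· == ' ')
    · simp [hany]
    · have hself : List.takeWhile (fun x => !decide (x = ' ')) q.toList = q.toList := by
        rw [List.takeWhile_eq_self_iff]
        intro a ha
        simp only [List.any_eq_true, beq_iff_eq, not_exists, not_and] at hany
        simp [hany a ha]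
      simp [hany, hself]
  rw [hB]
  unfold classify_tier
  simp only [TIER3_PREFIXES, TIER4_PREFIXES, List.any_cons, List.any_nil, Bool.or_false]
  set t := q.toList.takeWhile (· ≠ ' ') with htdef
  have e3 : pvPrefixHit q "non_question" = true ↔ t = "non_question".toList :=
    hit_eq q "non_question" (by decide)
  have e4a : pvPrefixHit q "arch_comprehension" = true ↔ t = "arch_comprehension".toList :=
    hit_eq q "arch_comprehension" (by decide)
  have e4b : pvPrefixHit q "arch_planning" = true ↔ t = "arch_planning".toList :=
    hit_eq q "arch_planning" (by decide)
  have key : ∀ (s : String), (s == String.ofList t) = true ↔ t = s.toList := by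
    intro s
    rw [beq_iff_eq, String.ext_iff, String.toList_ofList]
    exact eq_comm
  by_cases h3 : t = "non_question".toList
  · rw [if_pos (e3.mpr h3)]
    simp [PySem.Dict.getD, PySem.Dict.get?, TIER_BY_TOKEN, (key "non_question").mpr h3]
  · rw [if_neg (fun h => h3 (e3.mp h))]
    by_cases h4a : t = "arch_comprehension".toList
    · rw [if_pos (by rw [Bool.or_eq_true]; exact Or.inl (e4a.mpr h4a))]
      have k3 : ("non_question" == String.ofList t) = false := by
        rw [Bool.eq_false_iff]; intro h; exact h3 ((key _).mp h)
      simp [PySem.Dict.getD, PySem.Dict.get?, TIER_BY_TOKEN, List.find?, k3, (key "arch_comprehension").mpr h4a]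
    · by_cases h4b : t = "arch_planning".toList
      · rw [if_pos (by rw [Bool.or_eq_true]; exact Or.inr (e4b.mpr h4b))]
        have k3 : ("non_question" == String.ofList t) = false := by
          rw [Bool.eq_false_iff]; intro h; exact h3 ((key _).mp h)
        have k4a : ("arch_comprehension" == String.ofList t) = false := by
          rw [Bool.eq_false_iff]; intro h; exact h4a ((key _).mp h)
        simp [PySem.Dict.getD, PySem.Dict.get?, TIER_BY_TOKEN, List.find?, k3, k4a, (key "arch_planning").mpr h4b]
      · rw [if_neg (by
          rw [Bool.or_eq_true]; rintro (h | h)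
          · exact h4a (e4a.mp h)
          · exact h4b (e4b.mp h))]
        have k3 : ("non_question" == String.ofList t) = false := by
          rw [Bool.eq_false_iff]; intro h; exact h3 ((key _).mp h)
        have k4a : ("arch_comprehension" == String.ofList t) = false := by
          rw [Bool.eq_false_iff]; intro h; exact h4a ((key _).mp h)
        have k4b : ("arch_planning" == String.ofList t) = false := by
          rw [Bool.eq_false_iff]; intro h; exact h4b ((key _).mp h)
        simp [PySem.Dict.getD, PySem.Dict.get?, TIER_BY_TOKEN, List.find?, k3, k4a, k4b]
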